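-- pv_equiv track=rewrite | github.com/sintel-dev/Orion | orion/primitives/azure_anomaly_detector.py | _convert_anomalies_to_contextual
-- ===== SOURCE A (Python) =====
-- def _convert_anomalies_to_contextual(X, interval=1):
--     """ Convert list of timestamps to list of tuples.
--
--     Convert a list of anomalies identified by timestamps,
--     to a list of tuples marking the start and end interval
--     of anomalies; make it contextually defined.
--
--     Args:
--         X (list): contains timestamp of anomalies.
--         interval (int): allowed gap between anomalies.
--
--     Returns:
--         list:
--             tuple (start, end, `None`) timestamp.
--     """
--     if len(X) == 0:
--         return []
--
--     X = sorted(X)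
--
--     start_ts = 0
--     max_ts = len(X) - 1
--
--     anomalies = list()
--     break_point = start_ts
--     while break_point < max_ts:
--         if X[break_point + 1] - X[break_point] <= interval:
--             break_point += 1
--             continue
--
--         anomalies.append((X[start_ts], X[break_point], None))
--         break_point += 1
--         start_ts = break_point
--
--     anomalies.append((X[start_ts], X[break_point], None))
--     return anomalies
-- ===== SOURCE B (Python) =====
-- def _convert_anomalies_to_contextual(X, interval=1):
--     if len(X) == 0:
--         return []
--     X = sorted(X)
--     breaks = [i for i in range(len(X) - 1) if X[i + 1] - X[i] > interval]
--     starts = [0] + [b + 1 for b in breaks]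
--     ends = breaks + [len(X) - 1]
--     return [(X[s], X[e], None) for s, e in zip(starts, ends)]
-- ===== Notes on version B (the rewrite author's own statement) =====
-- stated objective: alternative
-- what changed: Replaces A's stateful while-loop that opens/closes groups inline with a two-pass decomposition: first compute the list of break indices where the gap exceeds interval, then derive segment starts/ends from those indices and zip them into the output tuples.
import Mathlib
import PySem

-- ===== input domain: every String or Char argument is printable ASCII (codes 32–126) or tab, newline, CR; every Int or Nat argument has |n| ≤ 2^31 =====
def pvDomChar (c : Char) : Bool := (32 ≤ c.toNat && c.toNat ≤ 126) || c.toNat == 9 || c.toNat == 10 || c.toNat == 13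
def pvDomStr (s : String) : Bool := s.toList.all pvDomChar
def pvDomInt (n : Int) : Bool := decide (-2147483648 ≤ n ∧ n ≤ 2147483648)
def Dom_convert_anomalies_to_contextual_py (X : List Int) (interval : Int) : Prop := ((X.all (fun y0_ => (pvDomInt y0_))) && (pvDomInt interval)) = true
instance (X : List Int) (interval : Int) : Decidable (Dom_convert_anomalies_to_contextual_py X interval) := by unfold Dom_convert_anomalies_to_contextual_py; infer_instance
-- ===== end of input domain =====

-- B re-decomposes A's inline while-loop grouping into two passes (break indices, then zip of derived starts/ends); same results, no speed claim.

-- ===== PORT A =====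
-- the while loop of A: state (start_ts, break_point, anomalies); fuel = Y.length only bounds the recursion
-- (the loop advances break_point each step, so fuel is never exhausted); indices are always in range
-- (break_point ≤ Y.length - 1), so getD's default is never used
def convA_loop (Y : List Int) (interval : Int) : Nat → Nat → Nat →
    List (Int × Int × Option Int) → List (Int × Int × Option Int)
  | 0, startTs, breakPoint, anomalies =>
      anomalies ++ [(Y.getD startTs 0, Y.getD breakPoint 0, none)]
  | fuel + 1, startTs, breakPoint, anomalies =>
    if breakPoint < Y.length - 1 then
      if Y.getD (breakPoint + 1) 0 - Y.getD breakPoint 0 ≤ interval then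
        convA_loop Y interval fuel startTs (breakPoint + 1) anomalies
      else
        convA_loop Y interval fuel (breakPoint + 1) (breakPoint + 1)
          (anomalies ++ [(Y.getD startTs 0, Y.getD breakPoint 0, none)])
    else
      anomalies ++ [(Y.getD startTs 0, Y.getD breakPoint 0, none)]

def convert_anomalies_to_contextual_py (X : List Int) (interval : Int) : List (Int × Int × Option Int) :=
  if X.length = 0 then []
  else
    let Y := PySem.List.sorted X (fun x => x) false
    convA_loop Y interval Y.length 0 0 []

-- ===== PORT B =====
def convert_anomalies_to_contextual_py_alt (X : List Int) (interval : Int) : List (Int × Int × Option Int) :=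
  if X.length = 0 then []
  else
    let Y := PySem.List.sorted X (fun x => x) false
    let breaks := (List.range (Y.length - 1)).filter (fun i => decide (interval < Y.getD (i + 1) 0 - Y.getD i 0))
    let starts := 0 :: breaks.map (· + 1)
    let ends := breaks ++ [Y.length - 1]
    (starts.zip ends).map (fun p => (Y.getD p.1 0, Y.getD p.2 0, none))

-- ===== PRECONDITION & SPEC =====
def Spec_convert_anomalies_to_contextual_py (X : List Int) (interval : Int) (out : List (Int × Int × Option Int)) : Prop := out = convert_anomalies_to_contextual_py_alt X interval
instance (X : List Int) (interval : Int) (out : List (Int × Int × Option Int)) : Decidable (Spec_convert_anomalies_to_contextual_py X interval out) := by unfold Spec_convert_anomalies_to_contextual_py; infer_instance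

-- ===== CLAIM (what is proved, stated in full; the proofs are below) =====
def Claim_equal_convert_anomalies_to_contextual_py : Prop := ∀ (X : List Int) (interval : Int), Dom_convert_anomalies_to_contextual_py X interval → Spec_convert_anomalies_to_contextual_py X interval (convert_anomalies_to_contextual_py X interval)

-- ===== LEMMAS AND PROOFS =====

-- break indices in the suffix [b, n-1), as B computes them but starting at b
def breaksFrom (Y : List Int) (interval : Int) (b : Nat) : List Nat :=
  (List.range' b (Y.length - 1 - b)).filter (fun i => decide (interval < Y.getD (i + 1) 0 - Y.getD i 0))

theorem convA_loop_eq (Y : List Int) (interval : Int) :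
    ∀ (k b s : Nat) (acc : List (Int × Int × Option Int)), Y.length - 1 - b ≤ k → b ≤ Y.length - 1 →
    convA_loop Y interval k s b acc =
      acc ++ ((s :: (breaksFrom Y interval b).map (· + 1)).zip
              ((breaksFrom Y interval b) ++ [Y.length - 1])).map
              (fun p => (Y.getD p.1 0, Y.getD p.2 0, none)) := by
  intro k
  induction k with
  | zero =>
    intro b s acc hk hb
    have hbeq : b = Y.length - 1 := by omega
    subst hbeq
    have hb0 : breaksFrom Y interval (Y.length - 1) = [] := by
      unfold breaksFrom
      simp
    simp [convA_loop, hb0, List.zip]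
  | succ k ih =>
    intro b s acc hk hb
    by_cases hlt : b < Y.length - 1
    · have hrange : Y.length - 1 - b = (Y.length - 1 - (b + 1)) + 1 := by omega
      by_cases hgap : Y.getD (b + 1) 0 - Y.getD b 0 ≤ interval
      · have hbf : breaksFrom Y interval b = breaksFrom Y interval (b + 1) := by
          unfold breaksFrom
          rw [hrange, List.range'_succ]
          simp only [List.filter_cons, decide_eq_true_eq]
          rw [if_neg (by omega)]
        simp only [convA_loop, hlt, if_true, hgap, if_true]
        rw [ih (b + 1) s acc (by omega) (by omega), hbf]
      · have hgt : interval < Y.getD (b + 1) 0 - Y.getD b 0 := by omega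
        have hbf : breaksFrom Y interval b = b :: breaksFrom Y interval (b + 1) := by
          unfold breaksFrom
          rw [hrange, List.range'_succ]
          simp only [List.filter_cons, decide_eq_true_eq]
          rw [if_pos hgt]
        simp only [convA_loop, hlt, if_true, if_neg hgap]
        rw [ih (b + 1) (b + 1) _ (by omega) (by omega), hbf]
        simp [List.zip]
    · have hbeq : b = Y.length - 1 := by omega
      subst hbeq
      have hb0 : breaksFrom Y interval (Y.length - 1) = [] := by
        unfold breaksFrom
        simp
      simp [convA_loop, hb0, List.zip]

theorem convert_anomalies_to_contextual_py_eq_alt (X : List Int) (interval : Int) :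
    convert_anomalies_to_contextual_py X interval = convert_anomalies_to_contextual_py_alt X interval := by
  unfold convert_anomalies_to_contextual_py convert_anomalies_to_contextual_py_alt
  by_cases h : X.length = 0
  · simp [h]
  · simp only [h, if_false]
    rw [convA_loop_eq _ _ _ 0 0 [] (by simp) (by omega)]
    unfold breaksFrom
    simp [List.range_eq_range']

-- ===== VERDICT (by name: the statement is the Claim_ definition above) =====
theorem convert_anomalies_to_contextual_py_spec : Claim_equal_convert_anomalies_to_contextual_py := by
  intro X interval _
  exact convert_anomalies_to_contextual_py_eq_alt X interval
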